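-- pv_equiv track=rewrite | github.com/knalecz/tsp_assembly | src/helpers/calculate_matches.py | calculate_matches
-- ===== SOURCE A (Python) =====
-- def calculate_common_nucleotides(x, y):
--     assert(len(x) == len(y))
--     return sum([1 if x[i]==y[i] else 0 for i in range(len(x))])
--
-- def calculate_matches(seq_i, seq_j):
--     if len(seq_i)>=len(seq_j):
--         sig_delsi=seq_i
--         sig_kratsi=seq_j
--     else:
--         sig_delsi=seq_j
--         sig_kratsi=seq_i
--
--     LD=len(sig_delsi)
--     LK=len(sig_kratsi)
--
--     score=[]
--
--     for a in range(2, LK):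
--         x=sig_kratsi[-a:];
--         y=sig_delsi[:a];
--         score.append(calculate_common_nucleotides(x, y))
--
--     score[0:9]=[0]*9;
--
--     if LD!=LK:
--         for b in range(abs(LD-LK)):
--             x=sig_kratsi;
--             y=sig_delsi[b:b+LK];
--             score.append(calculate_common_nucleotides(x, y))
--
--     for c in range(2, LK):
--         x=sig_kratsi[0:len(sig_kratsi)-c+1]
--         y=sig_delsi[-LK+c-1:]
--         score.append(calculate_common_nucleotides(x, y))
--
--     score[-9:] = [0]*9
--
--     return max(score), score.index(max(score))
-- ===== SOURCE B (Python) =====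
-- def calculate_matches(seq_i, seq_j):
--     if len(seq_i) >= len(seq_j):
--         long_s, short_s = seq_i, seq_j
--     else:
--         long_s, short_s = seq_j, seq_i
--     LD, LK = len(long_s), len(short_s)
--
--     # index the long sequence: positions of each character
--     pos = {}
--     for j, ch in enumerate(long_s):
--         pos.setdefault(ch, []).append(j)
--
--     # histogram of matching pairs per diagonal (shift = long index - short index)
--     diag = {}
--     for i, ch in enumerate(short_s):
--         for j in pos.get(ch, ()):
--             diag[j - i] = diag.get(j - i, 0) + 1
--
--     score = [diag.get(a - LK, 0) for a in range(2, LK)]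
--     score[0:9] = [0] * 9
--     score += [diag.get(b, 0) for b in range(LD - LK)]
--     score += [diag.get(LD - LK + c - 1, 0) for c in range(2, LK)]
--     score[-9:] = [0] * 9
--
--     best = max(score)
--     return best, score.index(best)
-- ===== Notes on version B (the rewrite author's own statement) =====
-- stated objective: faster
-- what changed: Instead of slicing the two strings and re-counting matches for every offset (a pass per offset), B builds a positions-per-character index of the longer string and accumulates a single per-diagonal histogram of all matching character pairs in one sweep, then reads each offset's score off the histogram.
import Mathlib
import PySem

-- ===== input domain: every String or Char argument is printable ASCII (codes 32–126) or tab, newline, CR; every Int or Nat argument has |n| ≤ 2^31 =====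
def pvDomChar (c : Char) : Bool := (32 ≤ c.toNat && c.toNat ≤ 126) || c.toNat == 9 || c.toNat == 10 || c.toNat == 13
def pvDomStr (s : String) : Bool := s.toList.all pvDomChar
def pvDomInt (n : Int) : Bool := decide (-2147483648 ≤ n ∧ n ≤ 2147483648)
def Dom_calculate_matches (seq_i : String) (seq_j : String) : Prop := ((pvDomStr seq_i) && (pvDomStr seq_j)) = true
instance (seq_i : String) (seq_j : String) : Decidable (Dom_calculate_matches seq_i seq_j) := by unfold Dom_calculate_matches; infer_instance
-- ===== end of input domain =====

-- B replaces A's per-offset slice-and-count passes by a one-pass per-diagonal match histogram built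
-- from a positions-of-each-character index of the longer string (measured faster by a constant factor).

-- ===== PORT A =====
-- calculate_common_nucleotides; the assert always holds at A's call sites (slices of equal length)
def pyccn (x y : List Char) : Int :=
  (List.map (fun i => if PySem.List.pyGetD x i '?' = PySem.List.pyGetD y i '?' then (1:Int) else 0)
    (PySem.List.pyRange 0 (PySem.List.len x) 1)).sum

-- the score list A builds (three append loops; score[0:9]=[0]*9 and score[-9:]=[0]*9 are ported
-- exactly as replicate/drop resp. take/replicate, which is Python's slice-assignment for these bounds)
def scoreA (sd sk : List Char) : List Int :=
  let LD : Int := PySem.List.len sd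
  let LK : Int := PySem.List.len sk
  let score : List Int := List.foldl
      (fun acc a => acc ++ [pyccn (PySem.List.slice sk (some (-a)) none) (PySem.List.slice sd none (some a))])
      [] (PySem.List.pyRange 2 LK 1)
  let score := List.replicate 9 (0:Int) ++ score.drop 9
  let score := if LD ≠ LK then
      List.foldl (fun acc b => acc ++ [pyccn sk (PySem.List.slice sd (some b) (some (b + LK)))])
        score (PySem.List.pyRange 0 |LD - LK| 1)
    else score
  let score := List.foldl
      (fun acc c => acc ++ [pyccn (PySem.List.slice sk (some 0) (some (PySem.List.len sk - c + 1)))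
                            (PySem.List.slice sd (some (-LK + c - 1)) none)])
      score (PySem.List.pyRange 2 LK 1)
  score.take (score.length - 9) ++ List.replicate 9 0

def calculate_matches (seq_i : String) (seq_j : String) : Int × Int :=
  let sd := if seq_j.toList.length ≤ seq_i.toList.length then seq_i.toList else seq_j.toList
  let sk := if seq_j.toList.length ≤ seq_i.toList.length then seq_j.toList else seq_i.toList
  let score := scoreA sd sk
  let m := (PySem.List.max? score (fun x => x)).getD 0   -- max(score); score has ≥ 9 entries, so never none
  (m, ((PySem.List.index? score m).getD 0 : Int))        -- score.index(m); m ∈ score, so never none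

-- ===== PORT B =====
-- pos.setdefault(ch, []).append(j)  ==  modify ch [] (· ++ [j])
def posIndex (ls : List Char) : PySem.Dict Char (List Int) :=
  List.foldl (fun d p => d.modify p.2 [] (· ++ [p.1])) PySem.Dict.empty
    (PySem.List.enumerate ls 0)

-- diag[j-i] = diag.get(j-i, 0) + 1  ==  modify (j - i) 0 (· + 1)
def diagIndex (ls ss : List Char) : PySem.Dict Int Int :=
  let pos := posIndex ls
  List.foldl (fun d p => List.foldl (fun d j => d.modify (j - p.1) 0 (· + 1)) d (pos.getD p.2 []))
    PySem.Dict.empty (PySem.List.enumerate ss 0)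

def scoreB (ls ss : List Char) : List Int :=
  let LD : Int := PySem.List.len ls
  let LK : Int := PySem.List.len ss
  let diag := diagIndex ls ss
  let score := List.map (fun a => diag.getD (a - LK) 0) (PySem.List.pyRange 2 LK 1)
  let score := List.replicate 9 (0:Int) ++ score.drop 9
  let score := score ++ List.map (fun b => diag.getD b 0) (PySem.List.pyRange 0 (LD - LK) 1)
  let score := score ++ List.map (fun c => diag.getD (LD - LK + c - 1) 0) (PySem.List.pyRange 2 LK 1)
  score.take (score.length - 9) ++ List.replicate 9 0

def calculate_matches_alt (seq_i : String) (seq_j : String) : Int × Int :=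
  let ls := if seq_j.toList.length ≤ seq_i.toList.length then seq_i.toList else seq_j.toList
  let ss := if seq_j.toList.length ≤ seq_i.toList.length then seq_j.toList else seq_i.toList
  let score := scoreB ls ss
  let m := (PySem.List.max? score (fun x => x)).getD 0
  (m, ((PySem.List.index? score m).getD 0 : Int))

-- ===== PRECONDITION & SPEC =====
def Spec_calculate_matches (seq_i : String) (seq_j : String) (out : Int × Int) : Prop := out = calculate_matches_alt seq_i seq_j
instance (seq_i : String) (seq_j : String) (out : Int × Int) : Decidable (Spec_calculate_matches seq_i seq_j out) := by unfold Spec_calculate_matches; infer_instance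

-- ===== CLAIM (what is proved, stated in full; the proofs are below) =====
def Claim_equal_calculate_matches : Prop := ∀ (seq_i : String) (seq_j : String), Dom_calculate_matches seq_i seq_j → Spec_calculate_matches seq_i seq_j (calculate_matches seq_i seq_j)

-- ===== LEMMAS AND PROOFS =====

-- number of indices i < |ss| that match in ls at diagonal shift s
def mCnt (ls ss : List Char) (s : Int) : Int :=
  ((List.range ss.length).countP
    (fun (i : Nat) => decide (0 ≤ s + (i:Int) ∧ s + (i:Int) < (ls.length:Int) ∧ ls.getD (s + (i:Int)).toNat '?' = ss.getD i '?')) : Int)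

theorem pyccn_eq (x y : List Char) :
    pyccn x y = ((List.range x.length).countP (fun i => decide (x.getD i '?' = y.getD i '?')) : Int) := by
  have h := PySem.List.sum_map_ite_one_zero (fun i => decide (x.getD i '?' = y.getD i '?')) (List.range x.length)
  simp only [pyccn, PySem.List.len_eq, PySem.List.pyRange_zero_nat, List.map_map,
    Function.comp_def, PySem.List.pyGetD_natCast, decide_eq_true_eq] at h ⊢
  exact h

theorem posIndex_getD (ls : List Char) (c : Char) :
    (posIndex ls).getD c [] =
      ((PySem.List.enumerate ls 0).filter (fun p => p.2 == c)).map (fun p => p.1) := by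
  have h := PySem.Dict.getD_foldl_modify_append
    ((PySem.List.enumerate ls 0).map (fun p => (p.2, p.1))) (PySem.Dict.empty) c
  rw [List.foldl_map] at h
  simp only [posIndex]
  simp only [List.filter_map, Function.comp_def, List.map_map] at h
  simpa using h

theorem pos_count (ls : List Char) (c : Char) (v : Int) :
    ((posIndex ls).getD c []).count v
      = if 0 ≤ v ∧ v < (ls.length:Int) ∧ ls.getD v.toNat '?' = c then 1 else 0 := by
  rw [posIndex_getD]
  have hnd : (((PySem.List.enumerate ls 0).filter (fun p => p.2 == c)).map (fun p => p.1)).Nodup :=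
    List.pairwise_map.2 (((PySem.List.pairwise_lt_enumerate ls 0).filter _).imp (fun h => ne_of_lt h))
  rw [List.Nodup.count hnd]
  have hmem : v ∈ ((PySem.List.enumerate ls 0).filter (fun p => p.2 == c)).map (fun p => p.1)
      ↔ (0 ≤ v ∧ v < (ls.length:Int) ∧ ls.getD v.toNat '?' = c) := by
    simp only [List.mem_map, List.mem_filter, PySem.List.mem_enumerate_iff]
    constructor
    · rintro ⟨p, ⟨⟨k, hk, rfl⟩, hc⟩, hv⟩
      simp only [beq_iff_eq] at hc
      simp only [zero_add] at hv ⊢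
      subst hv
      refine ⟨by positivity, by exact_mod_cast hk, ?_⟩
      rw [Int.toNat_natCast, List.getD_eq_getElem _ _ hk]
      exact hc
    · rintro ⟨h0, hlt, heq⟩
      have hk : v.toNat < ls.length := by omega
      refine ⟨(v, ls.getD v.toNat '?'), ⟨⟨v.toNat, hk, ?_⟩, by simpa using heq⟩, rfl⟩
      rw [List.getD_eq_getElem _ _ hk]
      simp [Int.toNat_of_nonneg h0]
  rw [if_congr hmem rfl rfl]

theorem diag_outer (ls : List Char) (l : List (Int × Char)) (d : PySem.Dict Int Int) (s : Int) :
    (List.foldl (fun d p => List.foldl (fun d j => d.modify (j - p.1) 0 (· + 1)) d ((posIndex ls).getD p.2 [])) d l).getD s 0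
      = d.getD s 0 + (l.map (fun p => ((((posIndex ls).getD p.2 []).count (s + p.1) : Nat) : Int))).sum := by
  induction l generalizing d with
  | nil => simp
  | cons p t ih =>
    simp only [List.foldl_cons, List.map_cons, List.sum_cons]
    rw [ih]
    have h1 : List.foldl (fun d j => d.modify (j - p.1) 0 (· + 1)) d ((posIndex ls).getD p.2 [])
          = List.foldl (fun d x => d.modify x 0 (· + 1)) d (((posIndex ls).getD p.2 []).map (fun j => j - p.1)) := by
      rw [List.foldl_map]
    have h2 : (((posIndex ls).getD p.2 []).map (fun j => j - p.1)).count s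
          = ((posIndex ls).getD p.2 []).count (s + p.1) := by
      have := List.count_map_of_injective ((posIndex ls).getD p.2 []) (fun j => j - p.1)
        (fun a b hab => by simpa using hab) (s + p.1)
      simpa using this
    rw [h1, PySem.Dict.getD_foldl_modify_add_one, h2]
    ring

theorem diagIndex_getD (ls ss : List Char) (s : Int) :
    (diagIndex ls ss).getD s 0 = mCnt ls ss s := by
  simp only [diagIndex]
  rw [diag_outer]
  rw [PySem.List.enumerate_eq_map_pyRange ss '?', List.map_map]
  simp only [PySem.List.len_eq]
  rw [PySem.List.pyRange_zero_nat, List.map_map]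
  rw [PySem.Dict.getD_empty]
  simp only [Function.comp_def]
  have hc : ∀ k ∈ List.range ss.length,
      (fun (k : Nat) => ((((posIndex ls).getD (PySem.List.pyGetD ss (k:Int) '?') []).count (s + (k:Int)) : Nat) : Int)) k
      = (fun (k : Nat) => if (decide (0 ≤ s + (k:Int) ∧ s + (k:Int) < (ls.length:Int) ∧ ls.getD (s + (k:Int)).toNat '?' = ss.getD k '?')) = true then (1:Int) else 0) k := by
    intro k hk
    simp only [PySem.List.pyGetD_natCast, pos_count, decide_eq_true_eq]
    split <;> simp
  rw [List.map_congr_left hc, PySem.List.sum_map_ite_one_zero]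
  simp [mCnt]

theorem seg1 (ls ss : List Char) (hle : ss.length ≤ ls.length) (a : Nat) (ha2 : 2 ≤ a) (haK : a < ss.length) :
    pyccn (ss.drop (ss.length - a)) (ls.take a) = mCnt ls ss ((a:Int) - (ss.length:Int)) := by
  rw [pyccn_eq, mCnt]
  have hlen : (ss.drop (ss.length - a)).length = a := by simp; omega
  rw [hlen]
  have hsplit : List.range ss.length = List.range (ss.length - a) ++ (List.range a).map (fun t => (ss.length - a) + t) := by
    rw [← List.range_add]; congr 1; omega
  rw [hsplit, List.countP_append, List.countP_map]
  have hz : (List.range (ss.length - a)).countP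
      (fun (i : Nat) => decide (0 ≤ ((a:Int) - (ss.length:Int)) + (i:Int) ∧ ((a:Int) - (ss.length:Int)) + (i:Int) < (ls.length:Int) ∧ ls.getD (((a:Int) - (ss.length:Int)) + (i:Int)).toNat '?' = ss.getD i '?')) = 0 := by
    rw [List.countP_eq_zero]
    intro i hi
    rw [List.mem_range] at hi
    simp only [decide_eq_true_eq, not_and]
    intro h0
    omega
  rw [hz, Nat.zero_add]
  congr 1
  apply List.countP_congr
  intro t ht'
  rw [List.mem_range] at ht'
  have hd : (ss.drop (ss.length - a)).getD t '?' = ss.getD (ss.length - a + t) '?' := by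
    rw [List.getD_eq_getElem _ _ (by simp; omega), List.getD_eq_getElem _ _ (by omega)]
    simp
  have hy : (ls.take a).getD t '?' = ls.getD t '?' := by
    rw [List.getD_eq_getElem _ _ (by simp; omega), List.getD_eq_getElem _ _ (by omega)]
    simp
  rw [Function.comp_apply, hd, hy]
  simp only [decide_eq_true_eq]
  have ht2 : ((a:Int) - (ss.length:Int) + ((ss.length - a + t : Nat) : Int)).toNat = t := by omega
  constructor
  · intro h
    refine ⟨by omega, by omega, ?_⟩
    rw [ht2]; exact h.symm
  · intro h
    rw [ht2] at h
    exact h.2.2.symm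

theorem seg2 (ls ss : List Char) (hle : ss.length ≤ ls.length) (b : Nat) (hb : b < ls.length - ss.length) :
    pyccn ss ((ls.drop b).take ss.length) = mCnt ls ss (b:Int) := by
  rw [pyccn_eq, mCnt]
  congr 1
  apply List.countP_congr
  intro i hi
  rw [List.mem_range] at hi
  have h1 : ((ls.drop b).take ss.length).getD i '?' = ls.getD (b+i) '?' := by
    rw [List.getD_eq_getElem _ _ (by simp; omega), List.getD_eq_getElem _ _ (by omega)]
    simp
  rw [h1]
  simp only [decide_eq_true_eq]
  have ht : ((b:Int)+(i:Int)).toNat = b + i := by omega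
  constructor
  · intro h
    refine ⟨by positivity, by exact_mod_cast (by omega : b + i < ls.length), ?_⟩
    rw [ht]; exact h.symm
  · intro h
    rw [ht] at h
    exact h.2.2.symm

theorem seg3 (ls ss : List Char) (hle : ss.length ≤ ls.length) (c : Nat) (hc2 : 2 ≤ c) (hcK : c < ss.length) :
    pyccn (ss.take (ss.length - c + 1)) (ls.drop (ls.length - (ss.length - c + 1)))
      = mCnt ls ss ((ls.length:Int) - (ss.length:Int) + (c:Int) - 1) := by
  rw [pyccn_eq, mCnt]
  set w := ss.length - c + 1 with hw
  have hwK : w < ss.length := by omega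
  have hlen : (ss.take w).length = w := by simp; omega
  rw [hlen]
  have hsplit : List.range ss.length = List.range w ++ (List.range (ss.length - w)).map (fun t => w + t) := by
    rw [← List.range_add]; congr 1; omega
  rw [hsplit, List.countP_append, List.countP_map]
  have hz : (List.range (ss.length - w)).countP
      ((fun (i : Nat) => decide (0 ≤ ((ls.length:Int) - (ss.length:Int) + (c:Int) - 1) + (i:Int) ∧ ((ls.length:Int) - (ss.length:Int) + (c:Int) - 1) + (i:Int) < (ls.length:Int) ∧ ls.getD (((ls.length:Int) - (ss.length:Int) + (c:Int) - 1) + (i:Int)).toNat '?' = ss.getD i '?')) ∘ (fun t => w + t)) = 0 := by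
    rw [List.countP_eq_zero]
    intro t ht
    rw [List.mem_range] at ht
    simp only [Function.comp_apply, decide_eq_true_eq, not_and]
    intro _ h2
    exfalso
    have : ((ls.length:Int) - (ss.length:Int) + (c:Int) - 1) + ((w + t : Nat) : Int) ≥ (ls.length:Int) := by
      push_cast; omega
    omega
  rw [hz, Nat.add_zero]
  congr 1
  apply List.countP_congr
  intro t ht'
  rw [List.mem_range] at ht'
  have hd : (ss.take w).getD t '?' = ss.getD t '?' := by
    rw [List.getD_eq_getElem _ _ (by simp; omega), List.getD_eq_getElem _ _ (by omega)]
    simp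
  have hy : (ls.drop (ls.length - w)).getD t '?' = ls.getD (ls.length - w + t) '?' := by
    rw [List.getD_eq_getElem _ _ (by simp; omega), List.getD_eq_getElem _ _ (by omega)]
    simp
  rw [hd, hy]
  simp only [decide_eq_true_eq]
  have ht2 : (((ls.length:Int) - (ss.length:Int) + (c:Int) - 1) + (t:Int)).toNat = ls.length - w + t := by omega
  constructor
  · intro h
    refine ⟨by omega, by omega, ?_⟩
    rw [ht2]; exact h.symm
  · intro h
    rw [ht2] at h
    exact h.2.2.symm

-- pointwise equality of the three score segments
theorem ptw1 (sd sk : List Char) (hle : sk.length ≤ sd.length) (a : Int)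
    (h2 : 2 ≤ a) (hK : a < (sk.length:Int)) :
    pyccn (PySem.List.slice sk (some (-a)) none) (PySem.List.slice sd none (some a))
      = (diagIndex sd sk).getD (a - (sk.length:Int)) 0 := by
  rw [diagIndex_getD]
  have haN : a = ((a.toNat : Nat) : Int) := by omega
  rw [haN, PySem.List.slice_from_neg_natCast _ _ (by omega), PySem.List.slice_to _ (by positivity)]
  rw [Int.toNat_natCast]
  exact seg1 sd sk hle a.toNat (by omega) (by omega)

theorem ptw2 (sd sk : List Char) (hle : sk.length ≤ sd.length) (b : Int)
    (h0 : 0 ≤ b) (hB : b < (sd.length:Int) - (sk.length:Int)) :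
    pyccn sk (PySem.List.slice sd (some b) (some (b + (sk.length:Int))))
      = (diagIndex sd sk).getD b 0 := by
  rw [diagIndex_getD]
  have hbN : b = ((b.toNat : Nat) : Int) := by omega
  rw [PySem.List.slice_toNat _ h0 (by positivity)]
  have htn : (b + (sk.length:Int)).toNat - b.toNat = sk.length := by omega
  rw [htn, hbN]
  exact seg2 sd sk hle b.toNat (by omega)

theorem ptw3 (sd sk : List Char) (hle : sk.length ≤ sd.length) (c : Int)
    (h2 : 2 ≤ c) (hK : c < (sk.length:Int)) :
    pyccn (PySem.List.slice sk (some 0) (some ((sk.length:Int) - c + 1)))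
          (PySem.List.slice sd (some (-(sk.length:Int) + c - 1)) none)
      = (diagIndex sd sk).getD ((sd.length:Int) - (sk.length:Int) + c - 1) 0 := by
  rw [diagIndex_getD]
  have hcN : c = ((c.toNat : Nat) : Int) := by omega
  have hw : ((sk.length:Int) - c + 1).toNat = sk.length - c.toNat + 1 := by omega
  have hneg : -(sk.length:Int) + c - 1 = -(((sk.length - c.toNat + 1 : Nat) : Int)) := by push_cast; omega
  rw [PySem.List.slice_zero_start, PySem.List.slice_to _ (by omega), hw,
      hneg, PySem.List.slice_from_neg_natCast _ _ (by omega)]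
  have := seg3 sd sk hle c.toNat (by omega) (by omega)
  rw [this]
  congr 1
  omega

theorem score_eq (sd sk : List Char) (hle : sk.length ≤ sd.length) :
    scoreA sd sk = scoreB sd sk := by
  simp only [scoreA, scoreB, PySem.List.len_eq]
  have h1 : List.foldl (fun acc a => acc ++ [pyccn (PySem.List.slice sk (some (-a)) none) (PySem.List.slice sd none (some a))]) [] (PySem.List.pyRange 2 (sk.length:Int) 1)
      = (PySem.List.pyRange 2 (sk.length:Int) 1).map (fun a => (diagIndex sd sk).getD (a - (sk.length:Int)) 0) := by
    rw [PySem.List.foldl_append_singleton_eq_map, List.nil_append]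
    exact List.map_congr_left (fun a ha => by
      rw [PySem.List.mem_pyRange_one] at ha; exact ptw1 sd sk hle a ha.1 ha.2)
  rw [h1]
  have h2 : ∀ sc : List Int,
      (if ((sd.length:Int)) ≠ ((sk.length:Int)) then
        List.foldl (fun acc b => acc ++ [pyccn sk (PySem.List.slice sd (some b) (some (b + (sk.length:Int))))]) sc (PySem.List.pyRange 0 |(sd.length:Int) - (sk.length:Int)| 1)
      else sc)
      = sc ++ (PySem.List.pyRange 0 ((sd.length:Int) - (sk.length:Int)) 1).map (fun b => (diagIndex sd sk).getD b 0) := by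
    intro sc
    by_cases hEq : (sd.length:Int) = (sk.length:Int)
    · rw [if_neg (by simpa using hEq), show (sd.length:Int) - (sk.length:Int) = 0 by omega,
          PySem.List.pyRange_one_eq_nil (le_refl 0), List.map_nil, List.append_nil]
    · rw [if_pos (by simpa using hEq),
          show |(sd.length:Int) - (sk.length:Int)| = (sd.length:Int) - (sk.length:Int) from abs_of_nonneg (by omega),
          PySem.List.foldl_append_singleton_eq_map]
      congr 1
      exact List.map_congr_left (fun b hb => by
        rw [PySem.List.mem_pyRange_one] at hb; exact ptw2 sd sk hle b hb.1 hb.2)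
  rw [h2]
  have h3 : ∀ sc : List Int,
      List.foldl (fun acc c => acc ++ [pyccn (PySem.List.slice sk (some 0) (some ((sk.length:Int) - c + 1)))
          (PySem.List.slice sd (some (-(sk.length:Int) + c - 1)) none)]) sc (PySem.List.pyRange 2 (sk.length:Int) 1)
      = sc ++ (PySem.List.pyRange 2 (sk.length:Int) 1).map
          (fun c => (diagIndex sd sk).getD ((sd.length:Int) - (sk.length:Int) + c - 1) 0) := by
    intro sc
    rw [PySem.List.foldl_append_singleton_eq_map]
    congr 1
    exact List.map_congr_left (fun c hc => by
      rw [PySem.List.mem_pyRange_one] at hc; exact ptw3 sd sk hle c hc.1 hc.2)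
  rw [h3]

-- ===== VERDICT (by name: the statement is the Claim_ definition above) =====
theorem calculate_matches_spec : Claim_equal_calculate_matches := by
  intro seq_i seq_j _
  unfold Spec_calculate_matches calculate_matches calculate_matches_alt
  by_cases h : seq_j.toList.length ≤ seq_i.toList.length
  · simp only [if_pos h]
    rw [score_eq _ _ h]
  · simp only [if_neg h]
    rw [score_eq _ _ ((by omega))]
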